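-- pv_equiv track=rewrite | github.com/coding-test-practice-programmers/practice-programmers | week_4/1_babbling/1_choi.py | solution
-- ===== SOURCE A (Python) =====
-- def solution(babbling):
--     answer = 0
--     list = ["aya", "ye", "woo", "ma"]
--
--     for i in babbling:
--         word = ''
--         count = 0
--
--         for j in i:
--             word += j
--             if word in list:
--                 word = ''
--                 count += 1
--
--         if len(word) == 0 and count > 0:
--             answer += 1
--
--     return answer
-- ===== SOURCE B (Python) =====
-- SYLLABLES = ("aya", "ye", "woo", "ma")
--
--
-- def _matches(w):
--     # w is decomposable into allowed syllables (empty string counts as decomposed)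
--     if w == "":
--         return True
--     for s in SYLLABLES:
--         if w.startswith(s):
--             return _matches(w[len(s):])
--     return False
--
--
-- def solution(babbling):
--     return sum(1 for w in babbling if w and _matches(w))
-- ===== Notes on version B (the rewrite author's own statement) =====
-- stated objective: idiomatic
-- what changed: Replaces A's greedy character-accumulation loop (buffer grows until it equals a syllable, then resets, with a count) by a recursive prefix-stripping membership test (strip one of the four syllables off the front of the word and recurse), counting matching nonempty words with a sum over a generator; equivalent because the four syllables start with four distinct letters.
import Mathlib
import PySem

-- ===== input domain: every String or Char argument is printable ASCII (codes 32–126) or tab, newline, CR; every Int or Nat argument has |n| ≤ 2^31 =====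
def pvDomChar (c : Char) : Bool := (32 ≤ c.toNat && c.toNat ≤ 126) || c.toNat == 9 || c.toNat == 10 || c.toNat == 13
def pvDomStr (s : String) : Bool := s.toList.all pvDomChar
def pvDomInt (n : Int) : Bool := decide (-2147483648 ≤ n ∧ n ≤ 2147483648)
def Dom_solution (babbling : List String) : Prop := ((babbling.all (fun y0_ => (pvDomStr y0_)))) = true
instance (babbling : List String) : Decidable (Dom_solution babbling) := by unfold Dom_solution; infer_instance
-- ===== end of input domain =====

-- B replaces A's greedy character-by-character buffer accumulation with a
-- prefix-stripping recursion over the syllable list (objective: idiomatic/simpler).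

-- ===== PORT A =====
-- A's inner loop state: (word buffer, count); strings handled as char lists.
def pvTargets : List (List Char) := [['a','y','a'], ['y','e'], ['w','o','o'], ['m','a']]

def stepA (st : List Char × Int) (j : Char) : List Char × Int :=
  let word := st.1 ++ [j]
  if word ∈ pvTargets then ([], st.2 + 1) else (word, st.2)

def solution (babbling : List String) : Int :=
  babbling.foldl (fun answer i =>
    let r := i.toList.foldl stepA ([], 0)
    if r.1.length = 0 ∧ r.2 > 0 then answer + 1 else answer) 0

-- ===== PORT B =====
-- B's _matches: strip one allowed syllable from the front and recurse.
def matchesB : List Char → Bool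
  | [] => true
  | 'a'::'y'::'a'::rest => matchesB rest
  | 'y'::'e'::rest => matchesB rest
  | 'w'::'o'::'o'::rest => matchesB rest
  | 'm'::'a'::rest => matchesB rest
  | _ => false

def solution_alt (babbling : List String) : Int :=
  babbling.foldl (fun acc w => if w.toList ≠ [] ∧ matchesB w.toList then acc + 1 else acc) 0

-- ===== PRECONDITION & SPEC =====
def Spec_solution (babbling : List String) (out : Int) : Prop := out = solution_alt babbling
instance (babbling : List String) (out : Int) : Decidable (Spec_solution babbling out) := by unfold Spec_solution; infer_instance

-- ===== CLAIM (what is proved, stated in full; the proofs are below) =====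
def Claim_equal_solution : Prop := ∀ (babbling : List String), Dom_solution babbling → Spec_solution babbling (solution babbling)

-- ===== LEMMAS AND PROOFS =====

-- a buffer none of whose extensions is a target: the fold just accumulates
def DeadB (buf : List Char) : Prop := ∀ ext : List Char, buf ++ ext ∉ pvTargets

lemma dead_run (cs : List Char) : ∀ (buf : List Char) (c : Int), DeadB buf →
    List.foldl stepA (buf, c) cs = (buf ++ cs, c) := by
  induction cs with
  | nil => intro buf c _; simp
  | cons j rest ih =>
    intro buf c hd
    have h1 : buf ++ [j] ∉ pvTargets := hd [j]
    have hd' : DeadB (buf ++ [j]) := by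
      intro ext; rw [List.append_assoc]; exact hd ([j] ++ ext)
    simp only [List.foldl_cons, stepA, if_neg h1]
    rw [ih _ _ hd']
    simp

-- count is monotone along the fold
lemma count_mono (cs : List Char) : ∀ (buf : List Char) (c : Int),
    c ≤ (List.foldl stepA (buf, c) cs).2 := by
  induction cs with
  | nil => intro buf c; simp
  | cons j rest ih =>
    intro buf c
    simp only [List.foldl_cons, stepA]
    split
    · exact le_trans (by omega) (ih [] (c+1))
    · exact ih _ c

-- from a nonempty buffer, reaching an empty buffer forces a reset (count strictly grows)
lemma count_pos (cs : List Char) : ∀ (buf : List Char) (c : Int), buf ≠ [] →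
    (List.foldl stepA (buf, c) cs).1 = [] → c < (List.foldl stepA (buf, c) cs).2 := by
  induction cs with
  | nil => intro buf c hb h; simp at h; exact absurd h hb
  | cons j rest ih =>
    intro buf c hb
    simp only [List.foldl_cons, stepA]
    split
    · intro _; exact lt_of_lt_of_le (by omega) (count_mono rest [] (c+1))
    · exact ih (buf ++ [j]) c (by simp)

-- the key characterisation: the greedy buffer ends empty iff matchesB holds
lemma K : ∀ (n : Nat) (cs : List Char), cs.length ≤ n → ∀ c : Int,
    ((List.foldl stepA ([], c) cs).1 = [] ↔ matchesB cs = true) := by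
  intro n
  induction n with
  | zero =>
    intro cs h c
    have : cs = [] := List.eq_nil_of_length_eq_zero (Nat.le_zero.mp h)
    subst this; simp [matchesB]
  | succ n ih =>
    intro cs h c
    match cs with
    | [] => simp [matchesB]
    | j :: rest =>
      have h1 : ([j] : List Char) ∈ pvTargets → False := by
        simp [pvTargets]
      simp only [List.foldl_cons, stepA, List.nil_append, if_neg h1]
      by_cases hja : j = 'a'
      · subst hja
        match rest with
        | [] => simp [matchesB]
        | k :: rest2 =>
          by_cases hk : k = 'y'
          · subst hk
            have h2 : (['a','y'] : List Char) ∉ pvTargets := by simp [pvTargets]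
            simp only [List.foldl_cons, stepA, List.cons_append, List.nil_append, if_neg h2]
            match rest2 with
            | [] => simp [matchesB]
            | l :: rest3 =>
              by_cases hl : l = 'a'
              · subst hl
                have h3 : (['a','y','a'] : List Char) ∈ pvTargets := by simp [pvTargets]
                simp only [List.foldl_cons, stepA, List.cons_append, List.nil_append, if_pos h3]
                have := ih rest3 (by simp at h; omega) (c + 1)
                simpa [matchesB] using this
              · have hdead : DeadB ['a','y',l] := by
                  intro ext hmem
                  simp [pvTargets] at hmem
                  rcases hmem with h'|h'|h'|h' <;> simp_all
                have h3 : (['a','y',l] : List Char) ∈ pvTargets → False := fun hm => hdead [] (by simpa using hm)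
                simp only [List.foldl_cons, stepA, List.cons_append, List.nil_append, if_neg h3]
                rw [dead_run rest3 _ c hdead]
                simp [matchesB, hl]
          · have hdead : DeadB ['a',k] := by
              intro ext hmem
              simp [pvTargets] at hmem
              rcases hmem with h'|h'|h'|h' <;> simp_all
            have h2 : (['a',k] : List Char) ∈ pvTargets → False := fun hm => hdead [] (by simpa using hm)
            simp only [List.foldl_cons, stepA, List.cons_append, List.nil_append, if_neg h2]
            rw [dead_run rest2 _ c hdead]
            simp [matchesB, hk]
      · by_cases hjy : j = 'y'
        · subst hjy
          match rest with
          | [] => simp [matchesB]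
          | k :: rest2 =>
            by_cases hk : k = 'e'
            · subst hk
              have h2 : (['y','e'] : List Char) ∈ pvTargets := by simp [pvTargets]
              simp only [List.foldl_cons, stepA, List.cons_append, List.nil_append, if_pos h2]
              have := ih rest2 (by simp at h; omega) (c + 1)
              simpa [matchesB] using this
            · have hdead : DeadB ['y',k] := by
                intro ext hmem
                simp [pvTargets] at hmem
                rcases hmem with h'|h'|h'|h' <;> simp_all
              have h2 : (['y',k] : List Char) ∈ pvTargets → False := fun hm => hdead [] (by simpa using hm)
              simp only [List.foldl_cons, stepA, List.cons_append, List.nil_append, if_neg h2]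
              rw [dead_run rest2 _ c hdead]
              simp [matchesB, hk]
        · by_cases hjw : j = 'w'
          · subst hjw
            match rest with
            | [] => simp [matchesB]
            | k :: rest2 =>
              by_cases hk : k = 'o'
              · subst hk
                have h2 : (['w','o'] : List Char) ∉ pvTargets := by simp [pvTargets]
                simp only [List.foldl_cons, stepA, List.cons_append, List.nil_append, if_neg h2]
                match rest2 with
                | [] => simp [matchesB]
                | l :: rest3 =>
                  by_cases hl : l = 'o'
                  · subst hl
                    have h3 : (['w','o','o'] : List Char) ∈ pvTargets := by simp [pvTargets]
                    simp only [List.foldl_cons, stepA, List.cons_append, List.nil_append, if_pos h3]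
                    have := ih rest3 (by simp at h; omega) (c + 1)
                    simpa [matchesB] using this
                  · have hdead : DeadB ['w','o',l] := by
                      intro ext hmem
                      simp [pvTargets] at hmem
                      rcases hmem with h'|h'|h'|h' <;> simp_all
                    have h3 : (['w','o',l] : List Char) ∈ pvTargets → False := fun hm => hdead [] (by simpa using hm)
                    simp only [List.foldl_cons, stepA, List.cons_append, List.nil_append, if_neg h3]
                    rw [dead_run rest3 _ c hdead]
                    simp [matchesB, hl]
              · have hdead : DeadB ['w',k] := by
                  intro ext hmem
                  simp [pvTargets] at hmem
                  rcases hmem with h'|h'|h'|h' <;> simp_all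
                have h2 : (['w',k] : List Char) ∈ pvTargets → False := fun hm => hdead [] (by simpa using hm)
                simp only [List.foldl_cons, stepA, List.cons_append, List.nil_append, if_neg h2]
                rw [dead_run rest2 _ c hdead]
                simp [matchesB, hk]
          · by_cases hjm : j = 'm'
            · subst hjm
              match rest with
              | [] => simp [matchesB]
              | k :: rest2 =>
                by_cases hk : k = 'a'
                · subst hk
                  have h2 : (['m','a'] : List Char) ∈ pvTargets := by simp [pvTargets]
                  simp only [List.foldl_cons, stepA, List.cons_append, List.nil_append, if_pos h2]
                  have := ih rest2 (by simp at h; omega) (c + 1)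
                  simpa [matchesB] using this
                · have hdead : DeadB ['m',k] := by
                    intro ext hmem
                    simp [pvTargets] at hmem
                    rcases hmem with h'|h'|h'|h' <;> simp_all
                  have h2 : (['m',k] : List Char) ∈ pvTargets → False := fun hm => hdead [] (by simpa using hm)
                  simp only [List.foldl_cons, stepA, List.cons_append, List.nil_append, if_neg h2]
                  rw [dead_run rest2 _ c hdead]
                  simp [matchesB, hk]
            · have hdead : DeadB [j] := by
                intro ext hmem
                simp [pvTargets] at hmem
                rcases hmem with h'|h'|h'|h' <;> simp_all
              rw [dead_run rest _ c hdead]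
              simp [matchesB, hja, hjy, hjw, hjm]

-- per-word agreement of the two counted conditions
lemma per_word (w : String) :
    ((List.foldl stepA ([], 0) w.toList).1.length = 0 ∧ (List.foldl stepA ([], 0) w.toList).2 > 0)
      ↔ (w.toList ≠ [] ∧ matchesB w.toList = true) := by
  set cs := w.toList with hcs
  match h : cs with
  | [] => simp [matchesB]
  | j :: rest =>
    have hK := K cs.length cs le_rfl 0
    rw [h] at hK
    constructor
    · intro ⟨h1, _⟩
      exact ⟨by simp, hK.mp (List.length_eq_zero_iff.mp h1)⟩
    · intro ⟨_, h2⟩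
      have hempty := hK.mpr h2
      refine ⟨List.length_eq_zero_iff.mpr hempty, ?_⟩
      have h1 : ([j] : List Char) ∈ pvTargets → False := by simp [pvTargets]
      simp only [List.foldl_cons, stepA, List.nil_append, if_neg h1] at hempty ⊢
      exact count_pos rest [j] 0 (by simp) hempty

-- ===== VERDICT (by name: the statement is the Claim_ definition above) =====
theorem solution_spec : Claim_equal_solution := by
  intro babbling hdom
  clear hdom
  unfold Spec_solution solution solution_alt
  induction babbling using List.reverseRecOn with
  | nil => rfl
  | append_singleton xs w ih =>
    rw [List.foldl_append, List.foldl_append, ih]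
    simp only [List.foldl_cons, List.foldl_nil]
    by_cases hw : (List.foldl stepA ([], 0) w.toList).1.length = 0 ∧ (List.foldl stepA ([], 0) w.toList).2 > 0
    · rw [if_pos hw, if_pos ((per_word w).mp hw)]
    · rw [if_neg hw, if_neg (fun hb => hw ((per_word w).mpr hb))]
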